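-- pv_equiv track=rewrite | github.com/esmeii/24_1_AI_Report | annealing.py | allocate_jobs_with_ECT
-- ===== SOURCE A (Python) =====
-- def allocate_jobs_with_ECT(solution, machine_completion_times):
--     machine_allocations = {machine: [] for machine in machine_completion_times.keys()}
--     allocated_jobs = []
--
--     for job in solution:
--         allocated_job = []
--         for task in job:
--             # 각 태스크를 처리할 수 있는 가장 빠른 기계를 찾습니다.
--             best_machine = min(machine_completion_times, key=lambda x: machine_completion_times[x])
--             # 해당 기계의 완료 시간을 업데이트합니다.
--             machine_completion_times[best_machine] += task[1]
--             # 할당된 태스크 정보를 업데이트합니다. (기계 번호, 처리 시간)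
--             allocated_job.append((best_machine, task[1]))
--             # 기계별 할당된 작업 시간을 업데이트합니다.
--             machine_allocations[best_machine].append(machine_completion_times[best_machine])
--         # 전체 작업에 대한 할당 결과를 업데이트합니다.
--         allocated_jobs.append(allocated_job)
--
--     # 수정된 함수에서는 각 작업에 대한 할당된 결과를 반환합니다.
--     return allocated_jobs, machine_allocations
-- ===== SOURCE B (Python) =====
-- def _insert_sorted(q, x):
--     # insert x into the sorted list q (before the first element >= x), binary search
--     lo, hi = 0, len(q)
--     while lo < hi:
--         mid = (lo + hi) // 2
--         if q[mid] < x: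
--             lo = mid + 1
--         else:
--             hi = mid
--     q.insert(lo, x)
--
--
-- def allocate_jobs_with_ECT(solution, machine_completion_times):
--     # Event-queue formulation: keep the machines in a list sorted by
--     # (completion_time, insertion_index); the next machine is always the head,
--     # so no per-task scan over all machines is needed.
--     machines = list(machine_completion_times.keys())
--     times = list(machine_completion_times.values())
--     n = len(machines)
--     queue = []
--     for i in range(n):
--         _insert_sorted(queue, (times[i], i))
--     alloc = [[] for _ in range(n)]
--     allocated_jobs = []
--     for job in solution:
--         allocated_job = []
--         for task in job:
--             t, i = queue.pop(0)
--             t2 = t + task[1]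
--             _insert_sorted(queue, (t2, i))
--             allocated_job.append((machines[i], task[1]))
--             alloc[i].append(t2)
--         allocated_jobs.append(allocated_job)
--     machine_allocations = {machines[i]: alloc[i] for i in range(n)}
--     return allocated_jobs, machine_allocations
-- ===== Notes on version B (the rewrite author's own statement) =====
-- stated objective: faster
-- what changed: Instead of re-scanning the whole machine dict with min(..., key=...) for every task, B keeps the machines in a queue sorted by (completion_time, insertion_index), pops the head and reinserts the machine at its new position found by binary search; allocation lists are kept per machine index and assembled into the result dict once at the end.
import Mathlib
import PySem

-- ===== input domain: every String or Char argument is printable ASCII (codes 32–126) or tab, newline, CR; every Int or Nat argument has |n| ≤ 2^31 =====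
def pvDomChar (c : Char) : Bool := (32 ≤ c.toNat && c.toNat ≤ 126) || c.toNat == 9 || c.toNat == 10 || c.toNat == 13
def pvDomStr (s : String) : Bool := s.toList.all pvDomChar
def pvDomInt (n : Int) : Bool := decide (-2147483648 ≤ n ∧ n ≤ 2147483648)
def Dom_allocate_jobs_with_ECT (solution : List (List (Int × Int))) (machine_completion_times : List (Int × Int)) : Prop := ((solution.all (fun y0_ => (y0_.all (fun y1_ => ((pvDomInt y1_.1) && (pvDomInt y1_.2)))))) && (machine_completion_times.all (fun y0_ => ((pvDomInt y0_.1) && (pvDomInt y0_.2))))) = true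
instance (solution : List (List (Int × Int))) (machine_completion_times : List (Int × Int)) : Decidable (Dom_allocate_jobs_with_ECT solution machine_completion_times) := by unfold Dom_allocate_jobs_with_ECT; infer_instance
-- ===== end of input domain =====

-- B replaces A's per-task linear min-scan over the machine dict by a queue of machines kept
-- sorted by (completion_time, insertion_index): the earliest machine is always the queue head.
-- A mutates its machine_completion_times argument in place (B does not); the equivalence
-- proved here is about the RETURN value only.


-- ===== PORT A =====
-- one task of A's inner loop: pick min-completion machine (first minimal key), update times,
-- record (machine, duration), append new completion time to that machine's allocation list
def pvStepA (st : (PySem.Dict Int Int × PySem.Dict Int (List Int)) × List (Int × Int))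
    (task : Int × Int) : (PySem.Dict Int Int × PySem.Dict Int (List Int)) × List (Int × Int) :=
  match PySem.List.min? st.1.1.keys (fun k => st.1.1.getD k 0) with
  | none => st        -- empty dict: Python's min raises ValueError here (excluded by Pre_)
  | some best =>
    let d' := st.1.1.insert best (st.1.1.getD best 0 + task.2)
    let malloc' := st.1.2.modify best [] (fun l => l ++ [d'.getD best 0])
    ((d', malloc'), st.2 ++ [(best, task.2)])

def pvJobA (acc : (PySem.Dict Int Int × PySem.Dict Int (List Int)) × List (List (Int × Int)))
    (job : List (Int × Int)) : (PySem.Dict Int Int × PySem.Dict Int (List Int)) × List (List (Int × Int)) :=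
  let r := job.foldl pvStepA (acc.1, [])
  (r.1, acc.2 ++ [r.2])

def allocate_jobs_with_ECT (solution : List (List (Int × Int))) (machine_completion_times : List (Int × Int)) : (List (List (Int × Int))) × (List (Int × List Int)) :=
  let d0 : PySem.Dict Int Int := PySem.Dict.mk machine_completion_times
  let malloc0 : PySem.Dict Int (List Int) :=
    d0.keys.foldl (fun m k => m.insert k ([] : List Int)) PySem.Dict.empty
  let fin := solution.foldl pvJobA ((d0, malloc0), [])
  (fin.2, fin.1.2.items)

-- ===== PORT B =====
-- _insert_sorted: binary search for the insertion point, then list.insert there.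
-- Python tuple comparison q[mid] < x on (time, index) pairs, written out componentwise
def pvLexLtB (x y : Int × Nat) : Bool := decide (x.1 < y.1) || (decide (x.1 = y.1) && decide (x.2 < y.2))

-- the while lo < hi loop; q[mid] is always in range, so getD is exact here
def pvBisect (q : List (Int × Nat)) (x : Int × Nat) (lo hi : Nat) : Nat :=
  if h : lo < hi then
    let mid := (lo + hi) / 2
    if pvLexLtB (q.getD mid (0, 0)) x then pvBisect q x (mid + 1) hi else pvBisect q x lo mid
  else lo
termination_by hi - lo
decreasing_by all_goals omega

-- q.insert(lo, x), Python list.insert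
def pvInsertSorted (q : List (Int × Nat)) (x : Int × Nat) : List (Int × Nat) :=
  PySem.List.insert q ((pvBisect q x 0 q.length : Nat) : Int) x

-- one task of B's inner loop: pop the queue head (earliest machine), push it back with the
-- new completion time, record the task, append the completion time to that machine's list
def pvStepB (machines : List Int) (st : (List (Int × Nat) × List (List Int)) × List (Int × Int))
    (task : Int × Int) : (List (Int × Nat) × List (List Int)) × List (Int × Int) :=
  match st.1.1 with
  | [] => st          -- empty queue: Python's pop raises IndexError here (excluded by Pre_)
  | (t, i) :: rest =>
    let t2 := t + task.2
    ((pvInsertSorted rest (t2, i), st.1.2.modify i (fun l => l ++ [t2])),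
     st.2 ++ [(machines.getD i 0, task.2)])

def pvJobB (machines : List Int) (acc : (List (Int × Nat) × List (List Int)) × List (List (Int × Int)))
    (job : List (Int × Int)) : (List (Int × Nat) × List (List Int)) × List (List (Int × Int)) :=
  let r := job.foldl (pvStepB machines) (acc.1, [])
  (r.1, acc.2 ++ [r.2])

def allocate_jobs_with_ECT_alt (solution : List (List (Int × Int))) (machine_completion_times : List (Int × Int)) : (List (List (Int × Int))) × (List (Int × List Int)) :=
  let d : PySem.Dict Int Int := PySem.Dict.mk machine_completion_times
  let machines := d.keys
  let times := d.values
  let n := machines.length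
  let queue0 := (List.range n).foldl (fun q i => pvInsertSorted q (times.getD i 0, i)) []
  let alloc0 : List (List Int) := List.replicate n []
  let fin := solution.foldl (pvJobB machines) ((queue0, alloc0), [])
  let md := (List.range n).foldl
    (fun (m : PySem.Dict Int (List Int)) i => m.insert (machines.getD i 0) (fin.1.2.getD i []))
    PySem.Dict.empty
  (fin.2, md.items)

-- ===== PRECONDITION & SPEC =====
-- Pre_ excludes (a) association lists with duplicate machine keys, which cannot arise from the
-- Python dict parameter (a dict's keys are unique), and (b) an empty dict together with at
-- least one task, on which Python's min([]) raises ValueError (B's pop raises IndexError too).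
def Pre_allocate_jobs_with_ECT (solution : List (List (Int × Int))) (machine_completion_times : List (Int × Int)) : Prop :=
  (machine_completion_times.map Prod.fst).Nodup ∧
  (machine_completion_times = [] → solution.all (fun j => j.isEmpty) = true)
instance (solution : List (List (Int × Int))) (machine_completion_times : List (Int × Int)) : Decidable (Pre_allocate_jobs_with_ECT solution machine_completion_times) := by unfold Pre_allocate_jobs_with_ECT; infer_instance

def pvWitness_allocate_jobs_with_ECT : (List (List (Int × Int))) × (List (Int × Int)) :=
  ([[(1, 3), (2, 2)], [(4, 1)]], [(7, 0), (8, 1)])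

def Spec_allocate_jobs_with_ECT (solution : List (List (Int × Int))) (machine_completion_times : List (Int × Int)) (out : (List (List (Int × Int))) × (List (Int × List Int))) : Prop := out = allocate_jobs_with_ECT_alt solution machine_completion_times
instance (solution : List (List (Int × Int))) (machine_completion_times : List (Int × Int)) (out : (List (List (Int × Int))) × (List (Int × List Int))) : Decidable (Spec_allocate_jobs_with_ECT solution machine_completion_times out) := by unfold Spec_allocate_jobs_with_ECT; infer_instance

-- ===== CLAIM (what is proved, stated in full; the proofs are below) =====
def Claim_equal_allocate_jobs_with_ECT : Prop := ∀ (solution : List (List (Int × Int))) (machine_completion_times : List (Int × Int)), Dom_allocate_jobs_with_ECT solution machine_completion_times → Pre_allocate_jobs_with_ECT solution machine_completion_times → Spec_allocate_jobs_with_ECT solution machine_completion_times (allocate_jobs_with_ECT solution machine_completion_times)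

-- ===== LEMMAS AND PROOFS =====

-- the strict lexicographic order on (completion_time, index) pairs
def pvLexLt (x y : Int × Nat) : Prop := x.1 < y.1 ∨ (x.1 = y.1 ∧ x.2 < y.2)

theorem pvLexLtB_iff {x y : Int × Nat} : pvLexLtB x y = true ↔ pvLexLt x y := by
  simp [pvLexLtB, pvLexLt]

theorem pvLexLt_of_not_ltB {x y : Int × Nat} (h : pvLexLtB x y = false) (hne : x.2 ≠ y.2) :
    pvLexLt y x := by
  simp [pvLexLtB] at h; unfold pvLexLt; omega

theorem pvLexLt_trans {x y z : Int × Nat} (h1 : pvLexLt x y) (h2 : pvLexLt y z) : pvLexLt x z := by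
  unfold pvLexLt at *; omega

theorem pvBisect_spec (q : List (Int × Nat)) (x : Int × Nat) (hs : q.Pairwise pvLexLt) :
    ∀ (n lo hi : Nat), hi - lo = n → lo ≤ hi → hi ≤ q.length →
    (∀ k, (hk : k < q.length) → k < lo → pvLexLtB (q[k]) x = true) →
    (∀ k, (hk : k < q.length) → hi ≤ k → pvLexLtB (q[k]) x = false) →
    (pvBisect q x lo hi ≤ q.length ∧
     (∀ k, (hk : k < q.length) → k < pvBisect q x lo hi → pvLexLtB (q[k]) x = true) ∧
     (∀ k, (hk : k < q.length) → pvBisect q x lo hi ≤ k → pvLexLtB (q[k]) x = false)) := by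
  intro n
  induction n using Nat.strong_induction_on with
  | _ n ih =>
    intro lo hi hn hlh hhl hlow hhigh
    have hget := List.pairwise_iff_getElem.mp hs
    by_cases h : lo < hi
    · have hmid : (lo + hi) / 2 < q.length := by omega
      have hgd : q.getD ((lo + hi) / 2) (0, 0) = q[(lo + hi) / 2] :=
        List.getD_eq_getElem _ _ hmid
      rw [pvBisect, dif_pos h]
      simp only [hgd]
      by_cases hc : pvLexLtB (q[(lo + hi) / 2]) x = true
      · rw [if_pos hc]
        refine ih (hi - ((lo + hi) / 2 + 1)) (by omega) ((lo + hi) / 2 + 1) hi rfl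
          (by omega) hhl ?_ hhigh
        intro k hk hkm
        rcases Nat.lt_or_ge k lo with hkl | hkl
        · exact hlow k hk hkl
        · rcases Nat.eq_or_lt_of_le (Nat.le_of_lt_succ hkm) with he | hlt
          · subst he; exact hc
          · exact pvLexLtB_iff.mpr
              (pvLexLt_trans (hget k _ hk hmid hlt) (pvLexLtB_iff.mp hc))
      · rw [if_neg hc]
        refine ih ((lo + hi) / 2 - lo) (by omega) lo ((lo + hi) / 2) rfl
          (by omega) (by omega) hlow ?_
        intro k hk hkm
        rcases Nat.eq_or_lt_of_le hkm with he | hlt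
        · subst he; exact Bool.eq_false_iff.mpr hc
        · apply Bool.eq_false_iff.mpr
          intro hct
          exact hc (pvLexLtB_iff.mpr
            (pvLexLt_trans (hget _ k hmid hk hlt) (pvLexLtB_iff.mp hct)))
    · rw [pvBisect, dif_neg h]
      have : lo = hi := by omega
      subst this
      exact ⟨by omega, fun k hk hkl => hlow k hk hkl, fun k hk hkl => hhigh k hk hkl⟩

theorem pvBisect_full (q : List (Int × Nat)) (x : Int × Nat) (hs : q.Pairwise pvLexLt) :
    pvBisect q x 0 q.length ≤ q.length ∧
    (∀ k, (hk : k < q.length) → k < pvBisect q x 0 q.length → pvLexLtB (q[k]) x = true) ∧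
    (∀ k, (hk : k < q.length) → pvBisect q x 0 q.length ≤ k → pvLexLtB (q[k]) x = false) :=
  pvBisect_spec q x hs (q.length - 0) 0 q.length rfl (by omega) (by omega)
    (by omega) (by omega)

theorem pvInsertSorted_eq (q : List (Int × Nat)) (x : Int × Nat) (hs : q.Pairwise pvLexLt) :
    pvInsertSorted q x
      = q.take (pvBisect q x 0 q.length) ++ x :: q.drop (pvBisect q x 0 q.length) := by
  unfold pvInsertSorted
  exact PySem.List.insert_natCast q _ x (pvBisect_full q x hs).1

theorem pvInsertSorted_perm (q : List (Int × Nat)) (x : Int × Nat) (hs : q.Pairwise pvLexLt) :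
    (pvInsertSorted q x).Perm (x :: q) := by
  rw [pvInsertSorted_eq q x hs]
  exact List.perm_middle.trans (by rw [List.take_append_drop])

theorem pvInsertSorted_sorted (q : List (Int × Nat)) (x : Int × Nat)
    (hs : q.Pairwise pvLexLt) (hne : ∀ y ∈ q, y.2 ≠ x.2) :
    (pvInsertSorted q x).Pairwise pvLexLt := by
  obtain ⟨hle, hlow, hhigh⟩ := pvBisect_full q x hs
  have hget := List.pairwise_iff_getElem.mp hs
  rw [pvInsertSorted_eq q x hs]
  have htake : ∀ y ∈ q.take (pvBisect q x 0 q.length),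
      ∃ k, ∃ hk : k < q.length, k < pvBisect q x 0 q.length ∧ q[k] = y := by
    intro y hy
    obtain ⟨k, hk, he⟩ := List.getElem_of_mem hy
    have hkb : k < pvBisect q x 0 q.length ∧ k < q.length := by
      have := hk; simp [List.length_take] at this; omega
    exact ⟨k, hkb.2, hkb.1, by rw [List.getElem_take] at he; exact he⟩
  have hdrop : ∀ y ∈ q.drop (pvBisect q x 0 q.length),
      ∃ k, ∃ hk : k < q.length, pvBisect q x 0 q.length ≤ k ∧ q[k] = y := by
    intro y hy
    obtain ⟨k, hk, he⟩ := List.getElem_of_mem hy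
    rw [List.getElem_drop] at he
    have hkl : pvBisect q x 0 q.length + k < q.length := by
      have := hk; simp [List.length_drop] at this; omega
    exact ⟨pvBisect q x 0 q.length + k, hkl, by omega, he⟩
  rw [List.pairwise_append]
  refine ⟨hs.sublist (List.take_sublist _ _), ?_, ?_⟩
  · rw [List.pairwise_cons]
    refine ⟨?_, hs.sublist (List.drop_sublist _ _)⟩
    intro y hy
    obtain ⟨k, hk, hkb, he⟩ := hdrop y hy
    rw [← he]
    exact pvLexLt_of_not_ltB (hhigh k hk hkb) (hne _ (List.getElem_mem hk))
  · intro a ha b hb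
    obtain ⟨k, hk, hkb, he⟩ := htake a ha
    rcases List.mem_cons.mp hb with rfl | hb
    · rw [← he]; exact pvLexLtB_iff.mp (hlow k hk hkb)
    · obtain ⟨m, hm, hmb, hme⟩ := hdrop b hb
      rw [← he, ← hme]
      exact hget k m hk hm (by omega)

theorem pv_min?_aux {key : Int → Int} (t : List Int) : ∀ m : Int,
    ∃ r, PySem.List.min? (m :: t) key = some r ∧
      (r = m ∨ ∃ j, ∃ hj : j < t.length, t[j] = r ∧ key r < key m ∧
        ∀ k, (hk : k < t.length) → k < j → key r < key t[k]) := by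
  induction t with
  | nil => intro m; exact ⟨m, by simp [PySem.List.min?], Or.inl rfl⟩
  | cons x t ih =>
    intro m
    have hstep : PySem.List.min? (m :: x :: t) key
        = PySem.List.min? ((if key x < key m then x else m) :: t) key := by
      simp [PySem.List.min?]; split_ifs <;> rfl
    by_cases h : key x < key m
    · rcases ih x with ⟨r, hr, hcase⟩
      refine ⟨r, by rw [hstep, if_pos h]; exact hr, Or.inr ?_⟩
      rcases hcase with rfl | ⟨j, hj, hrj, hlt, hfirst⟩
      · exact ⟨0, by simp, by simp, h, by omega⟩
      · refine ⟨j + 1, by simpa using Nat.succ_lt_succ hj, by simpa using hrj, lt_trans hlt h, ?_⟩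
        intro k hk hkj
        match k with
        | 0 => simpa using hlt
        | k + 1 => simpa using hfirst k (by simpa using hk) (by omega)
    · rcases ih m with ⟨r, hr, hcase⟩
      refine ⟨r, by rw [hstep, if_neg h]; exact hr, ?_⟩
      rcases hcase with rfl | ⟨j, hj, hrj, hlt, hfirst⟩
      · exact Or.inl rfl
      · refine Or.inr ⟨j + 1, by simpa using Nat.succ_lt_succ hj, by simpa using hrj, hlt, ?_⟩
        intro k hk hkj
        match k with
        | 0 => exact by simpa using lt_of_lt_of_le hlt (by omega)
        | k + 1 => simpa using hfirst k (by simpa using hk) (by omega)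
-- min? over a nonempty list returns the FIRST element attaining the minimal key
theorem pv_min?_first {xs : List Int} {key : Int → Int} {r : Int}
    (h : PySem.List.min? xs key = some r) :
    ∃ j : Nat, ∃ hj : j < xs.length, xs[j] = r ∧
      ∀ k, (hk : k < xs.length) → k < j → key r < key xs[k] := by
  match xs with
  | [] => simp [PySem.List.min?] at h
  | x :: t =>
    rcases pv_min?_aux (key := key) t x with ⟨r', hr', hcase⟩
    rw [hr'] at h
    obtain rfl : r' = r := Option.some_inj.mp h
    rcases hcase with rfl | ⟨j, hj, hrj, hlt, hfirst⟩
    · exact ⟨0, by simp, by simp, by omega⟩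
    · refine ⟨j + 1, by simpa using Nat.succ_lt_succ hj, by simpa using hrj, ?_⟩
      intro k hk hkj
      match k with
      | 0 => simpa using hlt
      | k + 1 => simpa using hfirst k (by simpa using hk) (by omega)
-- fold of fresh-key inserts appends all the items
theorem pv_items_foldl_insert {α ν : Type} (xs : List α) (kf : α → Int) (vf : α → ν) :
    ∀ (m : PySem.Dict Int ν),
    (∀ x ∈ xs, m.contains (kf x) = false) → (xs.map kf).Nodup →
    (xs.foldl (fun m x => m.insert (kf x) (vf x)) m).items
      = m.items ++ xs.map (fun x => (kf x, vf x)) := by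
  induction xs with
  | nil => intro m _ _; simp
  | cons x t ih =>
    intro m h hk
    have hc : m.contains (kf x) = false := h x (by simp)
    have hstep : (m.insert (kf x) (vf x)).items = m.items ++ [(kf x, vf x)] :=
      PySem.Dict.items_insert_of_not_contains m (vf x) hc
    have ht : ∀ y ∈ t, (m.insert (kf x) (vf x)).contains (kf y) = false := by
      intro y hy
      rw [PySem.Dict.contains_insert]
      have hk' := hk
      rw [List.map_cons, List.nodup_cons] at hk'
      have hne : kf y ≠ kf x := by
        intro he
        exact hk'.1 (he ▸ List.mem_map_of_mem hy)
      simp [hne, h y (by simp [hy])]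
    have := ih (m.insert (kf x) (vf x)) ht (by
      have hk' := hk
      rw [List.map_cons, List.nodup_cons] at hk'
      exact hk'.2)
    simp only [List.foldl_cons, this, hstep]
    simp
-- insert of an existing key rewrites exactly that key's slot
theorem pv_items_insert_at {ν : Type} (d : PySem.Dict Int ν) (j : Nat)
    (hj : j < d.items.length) (hnd : (d.items.map Prod.fst).Nodup) (v : ν) :
    (d.insert (d.items[j].1) v).items = d.items.set j (d.items[j].1, v) := by
  have hc : d.contains (d.items[j].1) = true := by
    rw [PySem.Dict.contains_iff_mem_keys]
    exact List.mem_map_of_mem (List.getElem_mem hj)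
  rw [PySem.Dict.items_insert_of_contains d v hc]
  apply List.ext_getElem (by simp)
  intro i h1 h2
  have hlen : i < d.items.length := by simpa using h1
  by_cases hij : i = j
  · subst hij
    simp [List.getElem_set]
  · have hne : d.items[i].1 ≠ d.items[j].1 := by
      intro he
      have : (d.items.map Prod.fst)[i]'(by simpa using hlen) = (d.items.map Prod.fst)[j]'(by simpa using hj) := by
        simpa using he
      exact hij (hnd.getElem_inj_iff.mp this)
    have hji : j ≠ i := fun h => hij h.symm
    simp [List.getElem_set, hne, hji]
theorem pv_getD_at {ν : Type} (d : PySem.Dict Int ν) (j : Nat)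
    (hj : j < d.items.length) (hnd : (d.items.map Prod.fst).Nodup) (v0 : ν) :
    d.getD (d.items[j].1) v0 = d.items[j].2 := by
  have hmem : (d.items[j].1, d.items[j].2) ∈ d.items := by
    simpa using List.getElem_mem hj
  exact PySem.Dict.getD_of_mem_items d hmem (by simpa [PySem.Dict.keys] using hnd) v0
-- a list is a permutation of its element at i consed onto the removal of position i
theorem pv_perm_getElem_cons_eraseIdx {α : Type} (l : List α) (i : Nat) (hi : i < l.length) :
    l.Perm (l[i] :: l.eraseIdx i) := by
  conv_lhs => rw [← List.take_append_drop i l, List.drop_eq_getElem_cons hi]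
  rw [List.eraseIdx_eq_take_drop_succ]
  exact List.perm_middle
theorem pv_set_perm {α : Type} (l : List α) (i : Nat) (hi : i < l.length) (a : α) :
    (l.set i a).Perm (a :: l.eraseIdx i) := by
  rw [List.set_eq_take_append_cons_drop, if_pos hi, List.eraseIdx_eq_take_drop_succ]
  exact List.perm_middle
theorem pv_zipIdx_set (l : List Int) (i : Nat) (a : Int) (hi : i < l.length) :
    (l.set i a).zipIdx = l.zipIdx.set i (a, i) := by
  apply List.ext_getElem (by simp)
  intro k h1 h2
  have hk : k < l.length := by simpa using h1
  rw [List.getElem_zipIdx]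
  by_cases hik : k = i
  · subst hik; simp [List.getElem_set]
  · have hik' : i ≠ k := fun h => hik h.symm
    simp [List.getElem_set, hik', List.getElem_zipIdx]

theorem pv_mem_eraseIdx_getElem {α : Type} (l : List α) (i : Nat) {y : α}
    (hy : y ∈ l.eraseIdx i) : ∃ k, ∃ hk : k < l.length, k ≠ i ∧ l[k] = y := by
  rw [List.eraseIdx_eq_take_drop_succ, List.mem_append] at hy
  rcases hy with hy | hy
  · rcases List.getElem_of_mem hy with ⟨k, hk, he⟩
    have hkl : k < l.length ∧ k < i := by
      have := hk; simp [List.length_take] at this; omega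
    rw [List.getElem_take] at he
    exact ⟨k, hkl.1, by omega, he⟩
  · rcases List.getElem_of_mem hy with ⟨k, hk, he⟩
    rw [List.getElem_drop] at he
    have hlen : i + 1 + k < l.length := by
      have := hk; simp [List.length_drop] at this; omega
    exact ⟨i + 1 + k, hlen, by omega, he⟩
-- the simulation invariant between A's state (d, malloc) and B's state (queue, alloc)
def pvInv (machines : List Int) (d : PySem.Dict Int Int) (malloc : PySem.Dict Int (List Int))
    (queue : List (Int × Nat)) (alloc : List (List Int)) : Prop :=
  d.items.map Prod.fst = machines ∧
  queue.Pairwise pvLexLt ∧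
  queue.Perm (d.items.map Prod.snd).zipIdx ∧
  alloc.length = machines.length ∧
  malloc.items = machines.zipIdx.map (fun p => (p.1, alloc.getD p.2 []))

theorem pv_step_sim (machines : List Int) (hnd : machines.Nodup)
    (d : PySem.Dict Int Int) (malloc : PySem.Dict Int (List Int))
    (queue : List (Int × Nat)) (alloc : List (List Int)) (aj : List (Int × Int))
    (task : Int × Int) (hInv : pvInv machines d malloc queue alloc) :
    pvInv machines (pvStepA ((d, malloc), aj) task).1.1 (pvStepA ((d, malloc), aj) task).1.2
        (pvStepB machines ((queue, alloc), aj) task).1.1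
        (pvStepB machines ((queue, alloc), aj) task).1.2 ∧
      (pvStepA ((d, malloc), aj) task).2 = (pvStepB machines ((queue, alloc), aj) task).2 := by
  obtain ⟨hkeys, hsort, hperm, hlen, hmalloc⟩ := hInv
  have hnd' : (d.items.map Prod.fst).Nodup := by rw [hkeys]; exact hnd
  have hkm : d.keys = machines := by rw [← hkeys]; rfl
  rcases queue with _ | ⟨⟨t, i⟩, rest⟩
  · -- empty queue: the dict is empty too, both steps are the identity
    have hz : (d.items.map Prod.snd).zipIdx = [] :=
      List.eq_nil_of_length_eq_zero (by simpa using hperm.length_eq.symm)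
    have hitems : d.items = [] := by
      have h0 : d.items.length = 0 := by simpa using congrArg List.length hz
      exact List.eq_nil_of_length_eq_zero h0
    have hmin : PySem.List.min? d.keys (fun k => d.getD k 0) = none := by
      have : d.keys = [] := by simp [PySem.Dict.keys, hitems]
      rw [this]; simp [PySem.List.min?]
    have hA : pvStepA ((d, malloc), aj) task = ((d, malloc), aj) := by
      simp [pvStepA, hmin]
    rw [hA]
    exact ⟨⟨hkeys, hsort, hperm, hlen, hmalloc⟩, rfl⟩
  · -- queue head (t, i) : the earliest machine
    have hilen : d.items.length = machines.length := by rw [← hkeys]; simp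
    have hvlen : (d.items.map Prod.snd).length = machines.length := by simpa using hilen
    have hmemti : (t, i) ∈ (d.items.map Prod.snd).zipIdx := hperm.subset (List.mem_cons_self)
    obtain ⟨-, hi0, ht0⟩ := List.mem_zipIdx hmemti
    have hi : i < machines.length := by
      rw [← hvlen]; omega
    have hii : i < d.items.length := by omega
    have ht : t = (d.items.map Prod.snd)[i]'(by omega) := by simpa using ht0
    have hkey_at : ∀ k, (hk : k < machines.length) →
        d.getD (machines[k]) 0 = (d.items.map Prod.snd)[k]'(by omega) := by
      intro k hk
      have hk' : k < d.items.length := by omega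
      have h1 : machines[k] = d.items[k].1 := by
        rw [List.getElem_of_eq hkeys.symm hk]; simp
      have h2 : (d.items.map Prod.snd)[k]'(by omega) = d.items[k].2 := by simp
      rw [h1, h2]
      exact pv_getD_at d k hk' hnd' 0
    -- B-side minimality of the head
    have hBmin : ∀ k, (hk : k < machines.length) →
        (t ≤ (d.items.map Prod.snd)[k]'(by omega) ∧
          (k < i → t < (d.items.map Prod.snd)[k]'(by omega))) := by
      intro k hk
      have hk2 : k < ((d.items.map Prod.snd).zipIdx).length := by simp; omega
      have h0 : ((d.items.map Prod.snd).zipIdx)[k]'hk2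
          = ((d.items.map Prod.snd)[k]'(by omega), k) := by
        simp [List.getElem_zipIdx]
      have hmemk : ((d.items.map Prod.snd)[k]'(by omega), k) ∈ (t, i) :: rest :=
        hperm.symm.subset (h0 ▸ List.getElem_mem hk2)
      rcases List.mem_cons.mp hmemk with he | hm
      · obtain ⟨h1, h2⟩ := Prod.mk.injEq .. |>.mp he
        constructor
        · omega
        · intro hki; omega
      · have hlt := (List.pairwise_cons.mp hsort).1 _ hm
        unfold pvLexLt at hlt
        simp only at hlt
        constructor
        · omega
        · intro hki; omega
    -- A-side: the chosen machine is exactly machines[i]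
    have hkeysne : d.keys ≠ [] := by
      rw [hkm]; intro h; rw [h] at hi; simp at hi
    obtain ⟨r, hr⟩ : ∃ r, PySem.List.min? d.keys (fun k => d.getD k 0) = some r := by
      cases hc : PySem.List.min? d.keys (fun k => d.getD k 0) with
      | none => exact absurd ((PySem.List.min?_eq_none_iff _ _).mp hc) hkeysne
      | some r => exact ⟨r, rfl⟩
    have hrm := hr; rw [hkm] at hrm
    obtain ⟨j, hj, hjr, hfirst⟩ := pv_min?_first hrm
    have hmin_all := PySem.List.min?_isMin hrm
    have hkeyr : d.getD r 0 = (d.items.map Prod.snd)[j]'(by omega) := by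
      rw [← hjr]; exact hkey_at j hj
    have hrt : d.getD r 0 ≤ t := by
      have := hmin_all (machines[i]) (List.getElem_mem hi)
      rw [hkey_at i hi] at this
      omega
    have htr : t ≤ d.getD r 0 := by
      rw [hkeyr]; exact (hBmin j hj).1
    have hji : j = i := by
      by_contra hne
      rcases Nat.lt_or_ge j i with hlt | hge
      · have := (hBmin j hj).2 hlt
        omega
      · have hij : i < j := by omega
        have := hfirst i hi hij
        rw [hkey_at i hi] at this
        omega
    subst hji
    have hbest : PySem.List.min? d.keys (fun k => d.getD k 0) = some (machines[j]) := by
      rw [hr, hjr]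
    have hgbest : d.getD machines[j] 0 = t := by
      rw [hkey_at j hj]; omega
    have hA : pvStepA ((d, malloc), aj) task
        = ((d.insert machines[j] (t + task.2),
            malloc.insert machines[j] ((malloc.getD machines[j] []) ++ [t + task.2])),
           aj ++ [(machines[j], task.2)]) := by
      simp only [pvStepA, hbest, hgbest, PySem.Dict.modify, PySem.Dict.getD_insert_self]
    have hB : pvStepB machines (((t, j) :: rest, alloc), aj) task
        = ((pvInsertSorted rest (t + task.2, j),
            alloc.modify j (fun l => l ++ [t + task.2])),
           aj ++ [(machines.getD j 0, task.2)]) := rfl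
    rw [hA, hB]
    have hmj : machines[j] = d.items[j].1 := by
      rw [List.getElem_of_eq hkeys.symm hj]; simp
    have hins : (d.insert machines[j] (t + task.2)).items
        = d.items.set j (d.items[j].1, t + task.2) := by
      rw [hmj]; exact pv_items_insert_at d j hii hnd' (t + task.2)
    have hrest_sorted : rest.Pairwise pvLexLt := (List.pairwise_cons.mp hsort).2
    have hzlen : j < ((d.items.map Prod.snd).zipIdx).length := by simp; omega
    have hz_at : ((d.items.map Prod.snd).zipIdx)[j]'hzlen = (t, j) := by
      simp only [List.getElem_zipIdx, Nat.zero_add]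
      rw [Prod.mk.injEq]
      exact ⟨by simpa using ht.symm, rfl⟩
    have hrest_perm : rest.Perm (((d.items.map Prod.snd).zipIdx).eraseIdx j) := by
      have h2 := pv_perm_getElem_cons_eraseIdx ((d.items.map Prod.snd).zipIdx) j hzlen
      rw [hz_at] at h2
      exact (hperm.trans h2).cons_inv
    have hne_rest : ∀ y ∈ rest, y.2 ≠ (t + task.2, j).2 := by
      intro y hy
      obtain ⟨k, hk, hkj, hky⟩ := pv_mem_eraseIdx_getElem _ j (hrest_perm.subset hy)
      have : y.2 = k := by
        rw [← hky]; simp [List.getElem_zipIdx]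
      simpa [this] using hkj
    have hperm' : (pvInsertSorted rest (t + task.2, j)).Perm
        (((d.insert machines[j] (t + task.2)).items.map Prod.snd).zipIdx) := by
      have hmap : (d.insert machines[j] (t + task.2)).items.map Prod.snd
          = (d.items.map Prod.snd).set j (t + task.2) := by
        rw [hins, List.map_set]
      rw [hmap, pv_zipIdx_set _ j _ (by simpa using hii)]
      refine ((pvInsertSorted_perm rest (t + task.2, j) hrest_sorted).trans ?_)
      refine (List.Perm.cons _ hrest_perm).trans ?_
      exact (pv_set_perm _ j hzlen _).symm
    have hmal_len : malloc.items.length = machines.length := by rw [hmalloc]; simp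
    have hmj' : malloc.items[j]'(by omega) = (machines[j], alloc.getD j []) := by
      rw [List.getElem_of_eq hmalloc (by omega)]
      simp [List.getElem_zipIdx]
    have hmnd : (malloc.items.map Prod.fst).Nodup := by
      rw [hmalloc, List.map_map]
      have : (Prod.fst ∘ fun p => (p.1, alloc.getD p.2 [])) = fun p : Int × Nat => p.1 := rfl
      rw [this]
      simpa [List.zipIdx_map_fst] using hnd
    have hget_mal : malloc.getD machines[j] [] = alloc.getD j [] := by
      have := pv_getD_at malloc j (by omega) hmnd []
      rw [hmj'] at this
      simpa using this
    have hmal_ins : (malloc.insert machines[j] ((malloc.getD machines[j] []) ++ [t + task.2])).items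
        = malloc.items.set j (machines[j], alloc.getD j [] ++ [t + task.2]) := by
      rw [hget_mal]
      have h5 := pv_items_insert_at malloc j (by omega) hmnd (alloc.getD j [] ++ [t + task.2])
      rw [hmj'] at h5
      simpa [hmj'] using h5
    refine ⟨⟨?_, ?_, hperm', ?_, ?_⟩, ?_⟩
    · rw [hins, List.map_set]
      have : (d.items[j].1, t + task.2).1 = (d.items.map Prod.fst)[j]'(by simpa using hii) := by simp
      rw [this, List.set_getElem_self, hkeys]
    · exact pvInsertSorted_sorted rest (t + task.2, j) hrest_sorted hne_rest
    · rw [List.length_modify]; exact hlen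
    · rw [hmal_ins]
      apply List.ext_getElem (by simp [hmal_len])
      intro k h1 h2
      have hk : k < machines.length := by
        simpa [hmal_len] using h1
      by_cases hkj : j = k
      · subst hkj
        rw [List.getElem_set]
        simp only [if_pos rfl]
        have hjal : j < alloc.length := by omega
        have hr1 : (List.map (fun p => (p.1, (alloc.modify j fun l => l ++ [t + task.2]).getD p.2 [])) machines.zipIdx)[j]'h2
            = (machines[j], (alloc.modify j fun l => l ++ [t + task.2]).getD j []) := by
          simp [List.getElem_zipIdx]
        rw [hr1]
        have : (alloc.modify j fun l => l ++ [t + task.2]).getD j [] = alloc.getD j [] ++ [t + task.2] := by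
          rw [List.getD_eq_getElem _ _ (by rw [List.length_modify]; omega),
              List.getElem_modify, if_pos rfl, List.getD_eq_getElem _ _ hjal]
        rw [this]
        simp
      · rw [List.getElem_set, if_neg hkj]
        have hr1 : (List.map (fun p => (p.1, (alloc.modify j fun l => l ++ [t + task.2]).getD p.2 [])) machines.zipIdx)[k]'h2
            = (machines[k], (alloc.modify j fun l => l ++ [t + task.2]).getD k []) := by
          simp [List.getElem_zipIdx]
        have hl1 : malloc.items[k]'(by omega) = (machines[k], alloc.getD k []) := by
          rw [List.getElem_of_eq hmalloc (by omega)]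
          simp [List.getElem_zipIdx]
        rw [hr1, hl1]
        have hkal : k < alloc.length := by omega
        have : (alloc.modify j fun l => l ++ [t + task.2]).getD k [] = alloc.getD k [] := by
          rw [List.getD_eq_getElem _ _ (by rw [List.length_modify]; omega),
              List.getElem_modify, if_neg hkj, List.getD_eq_getElem _ _ hkal]
        rw [this]
    · rw [List.getD_eq_getElem _ _ hj]
theorem pv_fold_sim (machines : List Int) (hnd : machines.Nodup) (job : List (Int × Int)) :
    ∀ (d : PySem.Dict Int Int) (malloc : PySem.Dict Int (List Int))
      (queue : List (Int × Nat)) (alloc : List (List Int)) (ajA ajB : List (Int × Int)),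
      pvInv machines d malloc queue alloc → ajA = ajB →
      pvInv machines (job.foldl pvStepA ((d, malloc), ajA)).1.1
          (job.foldl pvStepA ((d, malloc), ajA)).1.2
          (job.foldl (pvStepB machines) ((queue, alloc), ajB)).1.1
          (job.foldl (pvStepB machines) ((queue, alloc), ajB)).1.2 ∧
        (job.foldl pvStepA ((d, malloc), ajA)).2
          = (job.foldl (pvStepB machines) ((queue, alloc), ajB)).2 := by
  induction job with
  | nil =>
    intro d malloc queue alloc ajA ajB hInv haj
    exact ⟨hInv, haj⟩
  | cons task job ih =>
    intro d malloc queue alloc ajA ajB hInv haj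
    subst haj
    obtain ⟨hInv', haj'⟩ := pv_step_sim machines hnd d malloc queue alloc ajA task hInv
    exact ih (pvStepA ((d, malloc), ajA) task).1.1 (pvStepA ((d, malloc), ajA) task).1.2
      (pvStepB machines ((queue, alloc), ajA) task).1.1
      (pvStepB machines ((queue, alloc), ajA) task).1.2
      (pvStepA ((d, malloc), ajA) task).2
      (pvStepB machines ((queue, alloc), ajA) task).2 hInv' haj'

theorem pv_outer_sim (machines : List Int) (hnd : machines.Nodup) (solution : List (List (Int × Int))) :
    ∀ (d : PySem.Dict Int Int) (malloc : PySem.Dict Int (List Int))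
      (queue : List (Int × Nat)) (alloc : List (List Int)) (jobsA jobsB : List (List (Int × Int))),
      pvInv machines d malloc queue alloc → jobsA = jobsB →
      pvInv machines (solution.foldl pvJobA ((d, malloc), jobsA)).1.1
          (solution.foldl pvJobA ((d, malloc), jobsA)).1.2
          (solution.foldl (pvJobB machines) ((queue, alloc), jobsB)).1.1
          (solution.foldl (pvJobB machines) ((queue, alloc), jobsB)).1.2 ∧
        (solution.foldl pvJobA ((d, malloc), jobsA)).2
          = (solution.foldl (pvJobB machines) ((queue, alloc), jobsB)).2 := by
  induction solution with
  | nil =>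
    intro d malloc queue alloc jobsA jobsB hInv hjobs
    exact ⟨hInv, hjobs⟩
  | cons job solution ih =>
    intro d malloc queue alloc jobsA jobsB hInv hjobs
    obtain ⟨hInv', haj⟩ := pv_fold_sim machines hnd job d malloc queue alloc [] [] hInv rfl
    exact ih _ _ _ _ _ _ hInv' (by rw [hjobs, haj])

theorem pv_init_queue (times : List Int) (k : Nat) (hk : k ≤ times.length) :
    ((List.range k).foldl (fun q i => pvInsertSorted q (times.getD i 0, i)) []).Pairwise pvLexLt ∧
    ((List.range k).foldl (fun q i => pvInsertSorted q (times.getD i 0, i)) []).Perm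
      ((times.take k).zipIdx) := by
  induction k with
  | zero => simp
  | succ k ih =>
    obtain ⟨hs, hp⟩ := ih (by omega)
    rw [List.range_succ, List.foldl_append]
    simp only [List.foldl_cons, List.foldl_nil]
    have hkl : k < times.length := by omega
    have hget : times.getD k 0 = times[k] := List.getD_eq_getElem _ _ hkl
    have htake : (times.take (k + 1)).zipIdx = (times.take k).zipIdx ++ [(times[k], k)] := by
      rw [List.take_succ, List.getElem?_eq_getElem hkl]
      rw [List.zipIdx_append]
      simp [List.length_take, Nat.min_eq_left (Nat.le_of_lt hkl)]
    constructor
    · apply pvInsertSorted_sorted _ _ hs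
      intro y hy
      rcases y with ⟨yv, yi⟩
      obtain ⟨-, h2, -⟩ := List.mem_zipIdx (hp.subset hy)
      have : yi < k := by
        have := h2; simp [List.length_take] at this; omega
      simp; omega
    · rw [htake, hget]
      exact ((pvInsertSorted_perm _ _ hs).trans (hp.cons _)).trans
        (List.perm_append_singleton _ _).symm

theorem pv_getD_replicate (n k : Nat) : (List.replicate n ([] : List Int)).getD k [] = [] := by
  by_cases h : k < n
  · rw [List.getD_eq_getElem _ _ (by simpa using h), List.getElem_replicate]
  · rw [List.getD_eq_default]
    simpa using Nat.le_of_not_lt h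

-- ===== VERDICT (by name: the statement is the Claim_ definition above) =====
theorem allocate_jobs_with_ECT_spec : Claim_equal_allocate_jobs_with_ECT := by
  intro solution mct hdom hpre
  obtain ⟨hnd0, -⟩ := hpre
  show allocate_jobs_with_ECT solution mct = allocate_jobs_with_ECT_alt solution mct
  unfold allocate_jobs_with_ECT allocate_jobs_with_ECT_alt
  simp only []
  have hnd : PySem.Dict.keys (PySem.Dict.mk mct) |>.Nodup := by simpa using hnd0
  have hkv : (PySem.Dict.mk mct).keys.length = (PySem.Dict.mk mct).values.length := by
    simp [PySem.Dict.keys, PySem.Dict.values]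
  have hinit := pv_init_queue ((PySem.Dict.mk mct).values) ((PySem.Dict.mk mct).keys.length)
    (by omega)
  have htk : ((PySem.Dict.mk mct).values.take (PySem.Dict.mk mct).keys.length)
      = (PySem.Dict.mk mct).values := by
    rw [hkv, List.take_length]
  rw [htk] at hinit
  have hmal0 : ((PySem.Dict.mk mct).keys.foldl (fun m k => m.insert k ([] : List Int))
        PySem.Dict.empty).items
      = (PySem.Dict.mk mct).keys.zipIdx.map
          (fun p => (p.1, (List.replicate (PySem.Dict.mk mct).keys.length ([] : List Int)).getD p.2 [])) := by
    have h1 := pv_items_foldl_insert ((PySem.Dict.mk mct).keys) (fun k => k) (fun _ => ([] : List Int))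
      PySem.Dict.empty (fun x _ => PySem.Dict.contains_empty x) (by simpa using hnd)
    rw [h1]
    apply List.ext_getElem (by simp [PySem.Dict.empty])
    intro k h1 h2
    simp [PySem.Dict.empty, List.getElem_zipIdx, pv_getD_replicate, PySem.Dict.keys]
  have hInv0 : pvInv ((PySem.Dict.mk mct).keys) (PySem.Dict.mk mct)
      ((PySem.Dict.mk mct).keys.foldl (fun m k => m.insert k ([] : List Int)) PySem.Dict.empty)
      ((List.range (PySem.Dict.mk mct).keys.length).foldl
        (fun q i => pvInsertSorted q ((PySem.Dict.mk mct).values.getD i 0, i)) [])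
      (List.replicate (PySem.Dict.mk mct).keys.length []) := by
    refine ⟨rfl, hinit.1, ?_, by simp, hmal0⟩
    exact hinit.2
  obtain ⟨⟨hk', hs', hp', hl', hm'⟩, hjobs⟩ :=
    pv_outer_sim ((PySem.Dict.mk mct).keys) hnd solution (PySem.Dict.mk mct)
      ((PySem.Dict.mk mct).keys.foldl (fun m k => m.insert k ([] : List Int)) PySem.Dict.empty)
      ((List.range (PySem.Dict.mk mct).keys.length).foldl
        (fun q i => pvInsertSorted q ((PySem.Dict.mk mct).values.getD i 0, i)) [])
      (List.replicate (PySem.Dict.mk mct).keys.length []) [] [] hInv0 rfl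
  rw [Prod.mk.injEq]
  refine ⟨hjobs, ?_⟩
  rw [hm']
  have hmapr : (List.range (PySem.Dict.mk mct).keys.length).map
      (fun i => (PySem.Dict.mk mct).keys.getD i 0) = (PySem.Dict.mk mct).keys := by
    apply List.ext_getElem (by simp)
    intro k h1 h2
    simp only [List.getElem_map, List.getElem_range]
    exact List.getD_eq_getElem _ _ h2
  have h2 := pv_items_foldl_insert (List.range (PySem.Dict.mk mct).keys.length)
    (fun i => (PySem.Dict.mk mct).keys.getD i 0)
    (fun i => (List.foldl (pvJobB (PySem.Dict.mk mct).keys)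
        ((List.foldl (fun q i => pvInsertSorted q ((PySem.Dict.mk mct).values.getD i 0, i)) []
            (List.range (PySem.Dict.mk mct).keys.length),
          List.replicate (PySem.Dict.mk mct).keys.length []), []) solution).1.2.getD i [])
    PySem.Dict.empty (fun x _ => PySem.Dict.contains_empty _) (by rw [hmapr]; exact hnd)
  rw [h2]
  apply List.ext_getElem (by simp [PySem.Dict.empty])
  intro k h1 h2
  have hk : k < (PySem.Dict.mk mct).keys.length := by
    simpa [PySem.Dict.empty] using h1
  simp only [PySem.Dict.empty, List.nil_append, List.getElem_map, List.getElem_range,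
    List.getElem_zipIdx, Nat.zero_add]
  rw [List.getD_eq_getElem _ _ hk]
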